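-- pv_equiv track=rewrite | github.com/Tosha1409/Codilitychallenges | Nickel2018.py | solution
-- ===== SOURCE A (Python) =====
-- def solution(P):
--     limiter=result=0
--     l=len(P)
--
--     for x in range (0,l):
--         if P[x]==True:
--             result += (l-x)*(x+1-limiter)
--             limiter=x+1
--
--     return(min(result, 1000000000))
-- ===== SOURCE B (Python) =====
-- def solution(P):
--     l = len(P)
--     total = l * (l + 1) // 2
--     run = 0
--     for b in P:
--         if b == True:
--             total -= run * (run + 1) // 2
--             run = 0
--         else:
--             run += 1
--     total -= run * (run + 1) // 2
--     return min(total, 1000000000)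
-- ===== Notes on version B (the rewrite author's own statement) =====
-- stated objective: simpler
-- what changed: A accumulates, for each True index, (l-x)*(x+1-limiter) with a last-True 'limiter'; B counts the complement: all l*(l+1)//2 subarrays minus run*(run+1)//2 for each maximal run of non-True entries, in one index-free pass.
import Mathlib
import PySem

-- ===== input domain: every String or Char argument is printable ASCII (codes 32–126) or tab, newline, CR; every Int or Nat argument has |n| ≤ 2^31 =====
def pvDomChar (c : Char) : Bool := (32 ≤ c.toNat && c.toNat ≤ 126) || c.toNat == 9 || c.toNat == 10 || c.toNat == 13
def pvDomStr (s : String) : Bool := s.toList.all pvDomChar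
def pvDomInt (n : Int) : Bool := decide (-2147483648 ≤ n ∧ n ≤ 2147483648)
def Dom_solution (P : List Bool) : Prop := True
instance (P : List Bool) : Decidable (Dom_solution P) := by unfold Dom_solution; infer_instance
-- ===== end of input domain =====

-- B replaces A's per-True-index weighted accumulation by the complement count
-- (all subarrays minus all-False runs' subarrays): a different decomposition of the
-- same count, one plain pass over the booleans with no index arithmetic (objective: simpler).

-- ===== PORT A =====
-- literal transliteration of A: state (limiter, result), loop over range(0, l), read P[x]
def solution (P : List Bool) : Int :=
  let l : Int := (P.length : Int)
  let st : Int × Int :=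
    (PySem.List.pyRange 0 l 1).foldl
      (fun (s : Int × Int) (x : Int) =>
        if PySem.List.pyGetD P x false == true then
          (x + 1, s.2 + (l - x) * (x + 1 - s.1))
        else s)
      (0, 0)
  min st.2 1000000000

-- ===== PORT B =====
-- literal transliteration of Source B: total = l*(l+1)//2, one pass maintaining the
-- current run of non-True entries, subtract run*(run+1)//2 at each True and at the end
def solution_alt (P : List Bool) : Int :=
  let l : Int := (P.length : Int)
  let st : Int × Int :=
    P.foldl
      (fun (s : Int × Int) (b : Bool) =>
        if b == true then (s.1 - PySem.Int.floordiv (s.2 * (s.2 + 1)) 2, 0)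
        else (s.1, s.2 + 1))
      (PySem.Int.floordiv (l * (l + 1)) 2, 0)
  min (st.1 - PySem.Int.floordiv (st.2 * (st.2 + 1)) 2) 1000000000

-- ===== PRECONDITION & SPEC =====
def Spec_solution (P : List Bool) (out : Int) : Prop := out = solution_alt P
instance (P : List Bool) (out : Int) : Decidable (Spec_solution P out) := by unfold Spec_solution; infer_instance

-- ===== CLAIM (what is proved, stated in full; the proofs are below) =====
def Claim_equal_solution : Prop := ∀ (P : List Bool), Dom_solution P → Spec_solution P (solution P)

-- ===== LEMMAS AND PROOFS =====

-- T m = m*(m+1)//2 as in both ports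
def pvT (m : Int) : Int := PySem.Int.floordiv (m * (m + 1)) 2

theorem pvT_two (m : Int) : 2 * pvT m = m * (m + 1) := by
  have hdvd : (2 : Int) ∣ m * (m + 1) := (Int.even_mul_succ_self m).two_dvd
  unfold pvT
  rw [PySem.Int.floordiv_eq_ediv_of_pos (by omega)]
  omega

theorem pvT_split (c m : Int) : pvT (c + 1 + m) = pvT c + pvT m + (c + 1) * (m + 1) := by
  have h1 := pvT_two (c + 1 + m)
  have h2 := pvT_two c
  have h3 := pvT_two m
  nlinarith [h1, h2, h3]

-- A's loop, recursion over the remaining suffix of P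
def pvARun (t : List Bool) (l x : Int) (s : Int × Int) : Int × Int :=
  match t with
  | [] => s
  | b :: t' =>
      pvARun t' l (x + 1)
        (if b == true then (x + 1, s.2 + (l - x) * (x + 1 - s.1)) else s)

-- number of subarrays of false^c ++ t containing a True (first-True decomposition)
def pvM (t : List Bool) (c : Int) : Int :=
  match t with
  | [] => 0
  | b :: t' => if b then (c + 1) * (1 + (t'.length : Int)) + pvM t' 0 else pvM t' (c + 1)

-- B's run subtractions, including the pending run c
def pvS (t : List Bool) (c : Int) : Int :=
  match t with
  | [] => pvT c
  | b :: t' => if b then pvT c + pvS t' 0 else pvS t' (c + 1)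

theorem pvM_add_pvS (t : List Bool) (c : Int) : pvM t c + pvS t c = pvT (c + t.length) := by
  induction t generalizing c with
  | nil => simp [pvM, pvS]
  | cons b t' ih =>
    cases b with
    | false =>
      have hM : pvM (false :: t') c = pvM t' (c + 1) := rfl
      have hS : pvS (false :: t') c = pvS t' (c + 1) := rfl
      rw [hM, hS, ih (c + 1)]
      congr 1
      simp only [List.length_cons]
      push_cast
      ring
    | true =>
      have h0 := ih 0
      simp only [zero_add] at h0
      have hM : pvM (true :: t') c = (c + 1) * (1 + (t'.length : Int)) + pvM t' 0 := rfl
      have hS : pvS (true :: t') c = pvT c + pvS t' 0 := rfl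
      have hsplit : pvT (c + (t'.length : Int) + 1) =
          pvT c + pvT (t'.length : Int) + (c + 1) * ((t'.length : Int) + 1) := by
        rw [show c + (t'.length : Int) + 1 = c + 1 + (t'.length : Int) by ring]
        exact pvT_split c (t'.length : Int)
      rw [hM, hS]
      simp only [List.length_cons]
      push_cast
      rw [show c + ((t'.length : Int) + 1) = c + (t'.length : Int) + 1 by ring, hsplit]
      linear_combination h0

-- bridge: A's foldl over pyRange x len with indexing = pvARun on the dropped suffix
theorem pvA_bridge (P : List Bool) (x : Nat) (s : Int × Int) :
    (PySem.List.pyRange (x : Int) (P.length : Int) 1).foldl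
      (fun (s : Int × Int) (j : Int) =>
        if PySem.List.pyGetD P j false == true then
          (j + 1, s.2 + ((P.length : Int) - j) * (j + 1 - s.1))
        else s) s
      = pvARun (P.drop x) (P.length : Int) (x : Int) s := by
  by_cases h : x < P.length
  · rw [PySem.List.pyRange_one_cons (by exact_mod_cast h)]
    have hd : P.drop x = P[x] :: P.drop (x + 1) := List.drop_eq_getElem_cons h
    have hget : PySem.List.pyGetD P (x : Int) false = P[x] := by
      rw [PySem.List.pyGetD_natCast]
      simp [List.getD, h]
    rw [hd]
    simp only [List.foldl_cons, pvARun, hget]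
    have := pvA_bridge P (x + 1) (if P[x] == true then ((x : Int) + 1, s.2 + ((P.length : Int) - x) * ((x : Int) + 1 - s.1)) else s)
    push_cast at this ⊢
    exact this
  · have hd : P.drop x = [] := List.drop_eq_nil_of_le (by omega)
    rw [PySem.List.pyRange_one_eq_nil (by exact_mod_cast Nat.le_of_not_lt h), hd]
    simp [pvARun]
termination_by P.length - x

-- A's loop computes pvM
theorem pvARun_eq_pvM (t : List Bool) (l x lim r : Int) (hl : l = x + t.length) :
    (pvARun t l x (lim, r)).2 = r + pvM t (x - lim) := by
  induction t generalizing x lim r with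
  | nil => simp [pvARun, pvM]
  | cons b t' ih =>
    cases b with
    | false =>
      have hA : pvARun (false :: t') l x (lim, r) = pvARun t' l (x + 1) (lim, r) := rfl
      have hM : pvM (false :: t') (x - lim) = pvM t' (x - lim + 1) := rfl
      rw [hA, hM, ih (x + 1) lim r (by simp only [List.length_cons] at hl; push_cast at hl ⊢; omega)]
      ring_nf
    | true =>
      have hA : pvARun (true :: t') l x (lim, r)
          = pvARun t' l (x + 1) (x + 1, r + (l - x) * (x + 1 - lim)) := rfl
      have hM : pvM (true :: t') (x - lim)
          = (x - lim + 1) * (1 + (t'.length : Int)) + pvM t' 0 := rfl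
      rw [hA, hM, ih (x + 1) (x + 1) (r + (l - x) * (x + 1 - lim))
        (by simp only [List.length_cons] at hl; push_cast at hl ⊢; omega)]
      have hlx : l - x = 1 + (t'.length : Int) := by
        simp only [List.length_cons] at hl; push_cast at hl ⊢; omega
      rw [hlx]
      ring_nf

-- B's fold subtracts exactly pvS
theorem pvB_fold (t : List Bool) (tot run : Int) :
    (t.foldl
      (fun (s : Int × Int) (b : Bool) =>
        if b == true then (s.1 - PySem.Int.floordiv (s.2 * (s.2 + 1)) 2, 0)
        else (s.1, s.2 + 1)) (tot, run)).1
    - pvT (t.foldl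
      (fun (s : Int × Int) (b : Bool) =>
        if b == true then (s.1 - PySem.Int.floordiv (s.2 * (s.2 + 1)) 2, 0)
        else (s.1, s.2 + 1)) (tot, run)).2
    = tot - pvS t run := by
  induction t generalizing tot run with
  | nil => simp [pvS]
  | cons b t' ih =>
    cases b with
    | false =>
      have hS : pvS (false :: t') run = pvS t' (run + 1) := rfl
      simp only [List.foldl_cons]
      show _ = tot - pvS (false :: t') run
      rw [hS]
      exact ih tot (run + 1)
    | true =>
      have hS : pvS (true :: t') run = pvT run + pvS t' 0 := rfl
      simp only [List.foldl_cons]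
      show _ = tot - pvS (true :: t') run
      rw [hS]
      have := ih (tot - PySem.Int.floordiv (run * (run + 1)) 2) 0
      rw [show (tot - PySem.Int.floordiv (run * (run + 1)) 2) - pvS t' 0
            = tot - (pvT run + pvS t' 0) from by show tot - pvT run - pvS t' 0 = _; ring] at this
      exact this

-- ===== VERDICT (by name: the statement is the Claim_ definition above) =====
theorem solution_spec : Claim_equal_solution := by
  intro P _
  show solution P = solution_alt P
  unfold solution solution_alt
  simp only []
  have hA := pvA_bridge P 0 (0, 0)
  simp only [Nat.cast_zero, List.drop_zero] at hA
  rw [hA]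
  rw [pvARun_eq_pvM P (P.length : Int) 0 0 0 (by simp)]
  have hB := pvB_fold P (PySem.Int.floordiv ((P.length : Int) * ((P.length : Int) + 1)) 2) 0
  have hMS := pvM_add_pvS P 0
  simp only [zero_add] at hMS
  have hT : (PySem.Int.floordiv ((P.length : Int) * ((P.length : Int) + 1)) 2) = pvT (P.length : Int) := rfl
  rw [hT] at hB
  rw [hT]
  have hfinal : (P.foldl
      (fun (s : Int × Int) (b : Bool) =>
        if b == true then (s.1 - PySem.Int.floordiv (s.2 * (s.2 + 1)) 2, 0)
        else (s.1, s.2 + 1)) (pvT (P.length : Int), 0)).1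
    - PySem.Int.floordiv ((P.foldl
      (fun (s : Int × Int) (b : Bool) =>
        if b == true then (s.1 - PySem.Int.floordiv (s.2 * (s.2 + 1)) 2, 0)
        else (s.1, s.2 + 1)) (pvT (P.length : Int), 0)).2 *
        ((P.foldl
      (fun (s : Int × Int) (b : Bool) =>
        if b == true then (s.1 - PySem.Int.floordiv (s.2 * (s.2 + 1)) 2, 0)
        else (s.1, s.2 + 1)) (pvT (P.length : Int), 0)).2 + 1)) 2
    = pvT (P.length : Int) - pvS P 0 := hB
  rw [hfinal]
  congr 1
  have h00 : (0 : Int) - 0 = 0 := rfl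
  rw [zero_add, h00]
  linarith [hMS]
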